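-- pv_equiv track=rewrite | github.com/tomas-vl/hans | gui.py | readjustLetterPositions
-- ===== SOURCE A (Python) =====
-- def readjustLetterPositions(line_positions: list[int], letter_positions: list[tuple[int, str]], start: int, end: int) -> list[tuple[int, str]]:
--     temp_line_positions: list[int] = line_positions.copy()
--     temp_line_positions.append(start)
--     temp_line_positions.append(end)
--     temp_line_positions = sorted(temp_line_positions)
--
--     updated_letter_positions: list[tuple[int, str]] = letter_positions.copy()
--
--     for i in range(len(letter_positions)):
--         num: int = letter_positions[i][0]
--
--         for j in range(len(temp_line_positions) - 1):
--             if temp_line_positions[j] <= num <= temp_line_positions[j + 1]: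
--                 average = (temp_line_positions[j] + temp_line_positions[j + 1]) // 2
--                 updated_letter_positions[i] = (average, letter_positions[i][1])
--                 break
--
--     return updated_letter_positions
-- ===== SOURCE B (Python) =====
-- def readjustLetterPositions(line_positions: list[int], letter_positions: list[tuple[int, str]], start: int, end: int) -> list[tuple[int, str]]:
--     t = sorted(line_positions + [start, end])
--     lo_bound, hi_bound = t[0], t[-1]
--     result: list[tuple[int, str]] = []
--     for num, letter in letter_positions:
--         if lo_bound <= num <= hi_bound:
--             # bisect_left written out (this module imports nothing)
--             lo, hi = 0, len(t)
--             while lo < hi: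
--                 mid = (lo + hi) // 2
--                 if t[mid] < num:
--                     lo = mid + 1
--                 else:
--                     hi = mid
--             j = lo - 1 if lo > 0 else 0
--             result.append(((t[j] + t[j + 1]) // 2, letter))
--         else:
--             result.append((num, letter))
--     return result
-- ===== Notes on version B (the rewrite author's own statement) =====
-- stated objective: faster
-- what changed: B replaces A's per-letter linear scan over all intervals by one binary search (hand-written bisect_left) per letter on the sorted boundary list, with an explicit out-of-range test instead of a failed full scan.
import Mathlib
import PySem

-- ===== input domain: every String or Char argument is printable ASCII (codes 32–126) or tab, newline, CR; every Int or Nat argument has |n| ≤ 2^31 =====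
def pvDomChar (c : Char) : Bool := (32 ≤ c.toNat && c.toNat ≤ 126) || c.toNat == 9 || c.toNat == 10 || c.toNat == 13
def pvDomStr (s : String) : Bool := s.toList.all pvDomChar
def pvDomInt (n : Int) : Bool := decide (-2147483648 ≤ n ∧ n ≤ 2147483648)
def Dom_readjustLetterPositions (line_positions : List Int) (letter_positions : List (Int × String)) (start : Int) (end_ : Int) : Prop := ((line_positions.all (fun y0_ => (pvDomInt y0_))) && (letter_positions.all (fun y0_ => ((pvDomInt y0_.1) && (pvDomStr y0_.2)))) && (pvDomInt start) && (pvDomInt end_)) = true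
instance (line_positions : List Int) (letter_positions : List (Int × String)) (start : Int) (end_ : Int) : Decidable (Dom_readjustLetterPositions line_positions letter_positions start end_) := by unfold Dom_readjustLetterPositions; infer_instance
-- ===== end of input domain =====

-- B replaces A's per-letter linear scan over all intervals by one binary search per letter
-- on the sorted boundary list (objective: faster).

-- ===== PORT A =====
-- inner loop of A: "for j in range(len(temp)-1): if temp[j] <= num <= temp[j+1]: … break"
-- walked as the obvious structural recursion over consecutive pairs
def pvScanA : List Int → Int → Option Int
  | a :: b :: rest, num =>
      if a ≤ num ∧ num ≤ b then some (PySem.Int.floordiv (a + b) 2)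
      else pvScanA (b :: rest) num
  | _, _ => none

def readjustLetterPositions (line_positions : List Int) (letter_positions : List (Int × String)) (start : Int) (end_ : Int) : List (Int × String) :=
  let temp := PySem.List.sorted (line_positions ++ [start, end_]) (fun x => x)
  (List.range letter_positions.length).foldl
    (fun upd i =>
      match letter_positions[i]? with
      | some p =>
        match pvScanA temp p.1 with
        | some avg => upd.set i (avg, p.2)
        | none => upd
      | none => upd)
    letter_positions

-- ===== PORT B =====
def readjustLetterPositions_alt (line_positions : List Int) (letter_positions : List (Int × String)) (start : Int) (end_ : Int) : List (Int × String) :=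
  let t := PySem.List.sorted (line_positions ++ [start, end_]) (fun x => x)
  letter_positions.map (fun p =>
    if t.getD 0 0 ≤ p.1 ∧ p.1 ≤ t.getD (t.length - 1) 0 then
      -- Source B's hand-written bisect_left loop is exactly PySem.List.bisectLeft's loop
      let i := PySem.List.bisectLeft t p.1
      let j := if 0 < i then i - 1 else 0
      (PySem.Int.floordiv (t.getD j 0 + t.getD (j + 1) 0) 2, p.2)
    else p)

-- ===== PRECONDITION & SPEC =====
def Spec_readjustLetterPositions (line_positions : List Int) (letter_positions : List (Int × String)) (start : Int) (end_ : Int) (out : List (Int × String)) : Prop := out = readjustLetterPositions_alt line_positions letter_positions start end_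
instance (line_positions : List Int) (letter_positions : List (Int × String)) (start : Int) (end_ : Int) (out : List (Int × String)) : Decidable (Spec_readjustLetterPositions line_positions letter_positions start end_ out) := by unfold Spec_readjustLetterPositions; infer_instance

-- ===== CLAIM (what is proved, stated in full; the proofs are below) =====
def Claim_equal_readjustLetterPositions : Prop := ∀ (line_positions : List Int) (letter_positions : List (Int × String)) (start : Int) (end_ : Int), Dom_readjustLetterPositions line_positions letter_positions start end_ → Spec_readjustLetterPositions line_positions letter_positions start end_ (readjustLetterPositions line_positions letter_positions start end_)

-- ===== LEMMAS AND PROOFS =====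

-- per-element function computed by A's inner loop
def pvFA (t : List Int) (p : Int × String) : Int × String :=
  match pvScanA t p.1 with
  | some avg => (avg, p.2)
  | none => p

-- per-element function of B
def pvFB (t : List Int) (p : Int × String) : Int × String :=
  if t.getD 0 0 ≤ p.1 ∧ p.1 ≤ t.getD (t.length - 1) 0 then
    let i := PySem.List.bisectLeft t p.1
    let j := if 0 < i then i - 1 else 0
    (PySem.Int.floordiv (t.getD j 0 + t.getD (j + 1) 0) 2, p.2)
  else p

lemma scan_none_lo (t : List Int) (num : Int) (hs : t.Pairwise (· ≤ ·))
    (h : num < t.getD 0 0) : pvScanA t num = none := by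
  induction t with
  | nil => rfl
  | cons a u ih =>
    cases u with
    | nil => rfl
    | cons b rest =>
      have hab : a ≤ b := (List.pairwise_cons.1 hs).1 b (by simp)
      have h0 : num < a := by simpa [List.getD_cons_zero] using h
      simp only [pvScanA]
      rw [if_neg (by omega)]
      exact ih (List.pairwise_cons.1 hs).2
        (by simpa [List.getD_cons_zero] using lt_of_lt_of_le h0 hab)

lemma head_le_last (t : List Int) (hs : t.Pairwise (· ≤ ·)) (ht : t ≠ []) :
    t.getD 0 0 ≤ t.getD (t.length - 1) 0 := by
  have h0 : 0 < t.length := List.length_pos_iff.2 ht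
  have h1 : t.length - 1 < t.length := by omega
  rw [List.getD_eq_getElem t 0 h0, List.getD_eq_getElem t 0 h1]
  by_cases hl : t.length = 1
  · have hz : t.length - 1 = 0 := by omega
    simp [hz]
  · exact List.pairwise_iff_getElem.1 hs 0 (t.length - 1) h0 h1 (by omega)

lemma scan_none_hi (t : List Int) (num : Int) (hs : t.Pairwise (· ≤ ·))
    (h : t.getD (t.length - 1) 0 < num) : pvScanA t num = none := by
  induction t with
  | nil => rfl
  | cons a u ih =>
    cases u with
    | nil => rfl
    | cons b rest =>
      have hs' : (b :: rest).Pairwise (· ≤ ·) := (List.pairwise_cons.1 hs).2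
      have hlast : (a :: b :: rest).getD ((a :: b :: rest).length - 1) 0
          = (b :: rest).getD ((b :: rest).length - 1) 0 := by
        have h1 : (a :: b :: rest).length - 1 = ((b :: rest).length - 1) + 1 := by simp
        rw [h1, List.getD_cons_succ]
      rw [hlast] at h
      have hbl : b ≤ (b :: rest).getD ((b :: rest).length - 1) 0 := by
        simpa [List.getD_cons_zero] using head_le_last _ hs' (by simp)
      simp only [pvScanA]
      rw [if_neg (by omega)]
      exact ih hs' h

lemma scan_eq (t : List Int) (num : Int) (i : Nat)
    (hs : t.Pairwise (· ≤ ·)) (hlen : 2 ≤ t.length)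
    (hlo : t.getD 0 0 ≤ num)
    (hib : i < t.length)
    (hlt : ∀ j, j < i → t.getD j 0 < num)
    (hge : num ≤ t.getD i 0) :
    pvScanA t num
      = some (PySem.Int.floordiv
          (t.getD (if 0 < i then i - 1 else 0) 0 + t.getD ((if 0 < i then i - 1 else 0) + 1) 0) 2) := by
  induction t generalizing i with
  | nil => simp at hlen
  | cons a u ih =>
    cases u with
    | nil => simp at hlen
    | cons b rest =>
      by_cases hi2 : i ≤ 1
      · -- the first interval [a,b] brackets num
        have hnb : num ≤ b := by
          interval_cases i
          · have h1 : num ≤ a := by simpa [List.getD_cons_zero] using hge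
            have hab : a ≤ b := (List.pairwise_cons.1 hs).1 b (by simp)
            omega
          · simpa [List.getD_cons_succ, List.getD_cons_zero] using hge
        have hna : a ≤ num := by simpa [List.getD_cons_zero] using hlo
        have hj : (if 0 < i then i - 1 else 0) = 0 := by split_ifs <;> omega
        simp only [pvScanA, hj]
        rw [if_pos ⟨hna, hnb⟩]
        simp [List.getD_cons_zero, List.getD_cons_succ]
      · -- num > b: step into the tail with i - 1
        rw [not_le] at hi2
        have hb : b < num := by
          have := hlt 1 (by omega)
          simpa [List.getD_cons_succ, List.getD_cons_zero] using this
        have hs' : (b :: rest).Pairwise (· ≤ ·) := (List.pairwise_cons.1 hs).2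
        have hlen' : 2 ≤ (b :: rest).length := by
          simp only [List.length_cons] at hib ⊢
          omega
        obtain ⟨k, rfl⟩ : ∃ k, i = k + 2 := ⟨i - 2, by omega⟩
        have hres := ih hs' hlen' (by simpa [List.getD_cons_zero] using le_of_lt hb) (i := k + 1)
          (by simp only [List.length_cons] at hib ⊢; omega)
          (fun j hj => by
            have := hlt (j + 1) (by omega)
            simpa [List.getD_cons_succ] using this)
          (by simpa [List.getD_cons_succ] using hge)
        simp only [pvScanA]
        rw [if_neg (by omega), hres]
        have h1 : (if 0 < k + 1 then k + 1 - 1 else 0) = k := by split_ifs <;> omega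
        have h2 : (if 0 < k + 2 then k + 2 - 1 else 0) = k + 1 := by split_ifs <;> omega
        rw [h1, h2]
        simp [List.getD_cons_succ]

-- pointwise agreement of the two per-letter computations on a sorted list of length ≥ 2
lemma pvFA_eq_pvFB (t : List Int) (hs : t.Pairwise (· ≤ ·)) (hlen : 2 ≤ t.length)
    (p : Int × String) : pvFA t p = pvFB t p := by
  unfold pvFA pvFB
  by_cases hin : t.getD 0 0 ≤ p.1 ∧ p.1 ≤ t.getD (t.length - 1) 0
  · obtain ⟨h1, h2⟩ := hin
    obtain ⟨hle, hlt, hge⟩ := PySem.List.bisectLeft_spec t p.1 hs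
    set i := PySem.List.bisectLeft t p.1 with hidef
    have hib : i < t.length := by
      by_contra hcon
      have hi : i = t.length := by omega
      have hl : t.length - 1 < t.length := by omega
      have := hlt (t.length - 1) hl (by omega)
      rw [List.getD_eq_getElem t 0 hl] at h2
      omega
    have hsc := scan_eq t p.1 i hs hlen h1 hib
      (fun j hj => by
        have hjl : j < t.length := by omega
        have := hlt j hjl hj
        rw [List.getD_eq_getElem t 0 hjl]
        exact this)
      (by
        have := hge i hib (le_refl i)
        rw [List.getD_eq_getElem t 0 hib]
        exact this)
    rw [hsc,
      if_pos (show t.getD 0 0 ≤ p.1 ∧ p.1 ≤ t.getD (t.length - 1) 0 from ⟨h1, h2⟩)]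
  · rw [if_neg hin]
    rcases lt_or_ge p.1 (t.getD 0 0) with hl | hl
    · rw [scan_none_lo t p.1 hs hl]
    · have hhi : t.getD (t.length - 1) 0 < p.1 := by
        by_contra hc
        exact hin ⟨hl, by omega⟩
      rw [scan_none_hi t p.1 hs hhi]
-- invariant of A's outer loop: after n steps the first n entries are rewritten, the rest untouched
lemma foldA_invariant (t : List Int) (ls : List (Int × String)) (n : Nat) (hn : n ≤ ls.length) :
    (List.range n).foldl
      (fun upd i =>
        match ls[i]? with
        | some p =>
          match pvScanA t p.1 with
          | some avg => upd.set i (avg, p.2)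
          | none => upd
        | none => upd)
      ls
    = (ls.take n).map (pvFA t) ++ ls.drop n := by
  induction n with
  | zero => simp
  | succ n ih =>
    have hn' : n ≤ ls.length := by omega
    have hnl : n < ls.length := by omega
    rw [List.range_succ, List.foldl_append, ih hn']
    simp only [List.foldl_cons, List.foldl_nil]
    have hget : ls[n]? = some ls[n] := List.getElem?_eq_getElem hnl
    rw [hget]
    have hdrop : ls.drop n = ls[n] :: ls.drop (n + 1) := List.drop_eq_getElem_cons hnl
    have htake : ls.take (n + 1) = ls.take n ++ [ls[n]] := by
      rw [List.take_succ, hget]; simp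
    have hlen : ((ls.take n).map (pvFA t)).length = n := by
      simp [List.length_take, Nat.min_eq_left hn']
    rw [hdrop, htake, List.map_append]
    cases hsc : pvScanA t (ls[n]).1 with
    | none =>
      simp only [hsc]
      have hf : pvFA t ls[n] = ls[n] := by unfold pvFA; rw [hsc]
      rw [List.append_assoc]
      congr 1
      simp [hf]
    | some avg =>
      simp only [hsc]
      rw [List.set_append, hlen, if_neg (lt_irrefl n), Nat.sub_self, List.set_cons_zero]
      have hf : pvFA t ls[n] = (avg, (ls[n]).2) := by unfold pvFA; rw [hsc]
      rw [List.append_assoc]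
      congr 1
      simp [hf]

-- ===== VERDICT (by name: the statement is the Claim_ definition above) =====
theorem readjustLetterPositions_spec : Claim_equal_readjustLetterPositions := by
  intro lp ls start end_ _
  unfold Spec_readjustLetterPositions readjustLetterPositions readjustLetterPositions_alt
  set t := PySem.List.sorted (lp ++ [start, end_]) (fun x => x) with htdef
  have hs : t.Pairwise (· ≤ ·) := by
    have := PySem.List.sorted_pairwise (xs := lp ++ [start, end_]) (key := fun x => x)
    simpa [htdef] using this
  have hlen : 2 ≤ t.length := by
    rw [htdef, PySem.List.length_sorted]
    simp
  have hfold := foldA_invariant t ls ls.length (le_refl _)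
  simp only [List.take_length, List.drop_length, List.append_nil] at hfold
  rw [hfold]
  apply List.map_congr_left
  intro p _
  have := pvFA_eq_pvFB t hs hlen p
  unfold pvFB at this
  rw [← this]
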